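-- pv_equiv track=rewrite | github.com/jorzel/codefights | arcade/core/isSubstitutionCipher.py | isSubstitutionCipher
-- ===== SOURCE A (Python) =====
-- def isSubstitutionCipher(string1, string2):
--     alphabet1, alphabet2 = {}, {}
--
--     for s1, s2 in zip(string1, string2):
--         if s1 not in alphabet1:
--             alphabet1[s1] = s2
--         else:
--             if alphabet1[s1] != s2:
--                 return False
--         if s2 not in alphabet2:
--             alphabet2[s2] = s1
--         else:
--             if alphabet2[s2] != s1:
--                 return False
--     return True
-- ===== SOURCE B (Python) =====
-- def isSubstitutionCipher(string1, string2):
--     pairs = list(zip(string1, string2))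
--     return len(set(pairs)) == len({p[0] for p in pairs}) == len({p[1] for p in pairs})
-- ===== Notes on version B (the rewrite author's own statement) =====
-- stated objective: simpler
-- what changed: Replaces the streaming two-dict consistency loop with a one-line cardinality test: a bijective substitution exists iff the number of distinct (c1,c2) pairs equals both the number of distinct source chars and distinct target chars.
import Mathlib
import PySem

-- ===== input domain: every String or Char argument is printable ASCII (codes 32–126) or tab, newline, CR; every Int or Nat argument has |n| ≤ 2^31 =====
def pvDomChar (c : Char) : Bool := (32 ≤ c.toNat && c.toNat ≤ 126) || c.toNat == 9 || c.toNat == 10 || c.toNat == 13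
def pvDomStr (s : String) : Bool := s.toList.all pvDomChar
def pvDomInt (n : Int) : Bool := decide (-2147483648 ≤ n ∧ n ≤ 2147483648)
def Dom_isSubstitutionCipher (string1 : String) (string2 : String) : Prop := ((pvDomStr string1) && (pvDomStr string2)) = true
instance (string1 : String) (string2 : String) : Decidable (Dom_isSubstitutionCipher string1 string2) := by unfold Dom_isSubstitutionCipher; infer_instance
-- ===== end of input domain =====

-- B replaces A's streaming two-dict consistency loop by a single cardinality test on the zipped pairs
-- (distinct pairs = distinct sources = distinct targets); same value on every input, no speed claim.

-- ===== PORT A =====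
-- one dict step of A's loop body: 'if k not in d: d[k] = v else: if d[k] != v: return False'
-- (none = the early 'return False')
def stepA (d : PySem.Dict Char Char) (k v : Char) : Option (PySem.Dict Char Char) :=
  match d.get? k with
  | none => some (d.insert k v)
  | some w => if w ≠ v then none else some d

def loopA : List (Char × Char) → PySem.Dict Char Char → PySem.Dict Char Char → Bool
  | [], _, _ => true
  | (s1, s2) :: rest, d1, d2 =>
    match stepA d1 s1 s2 with
    | none => false
    | some d1' =>
      match stepA d2 s2 s1 with
      | none => false
      | some d2' => loopA rest d1' d2'

def isSubstitutionCipher (string1 : String) (string2 : String) : Bool :=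
  loopA (string1.toList.zip string2.toList) PySem.Dict.empty PySem.Dict.empty

-- ===== PORT B =====
def isSubstitutionCipher_alt (string1 : String) (string2 : String) : Bool :=
  let pairs := string1.toList.zip string2.toList
  ((PySem.Set.ofList pairs).length == (PySem.Set.ofList (pairs.map (·.1))).length) &&
    ((PySem.Set.ofList (pairs.map (·.1))).length == (PySem.Set.ofList (pairs.map (·.2))).length)

-- ===== PRECONDITION & SPEC =====
def Spec_isSubstitutionCipher (string1 : String) (string2 : String) (out : Bool) : Prop := out = isSubstitutionCipher_alt string1 string2
instance (string1 : String) (string2 : String) (out : Bool) : Decidable (Spec_isSubstitutionCipher string1 string2 out) := by unfold Spec_isSubstitutionCipher; infer_instance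

-- ===== CLAIM (what is proved, stated in full; the proofs are below) =====
def Claim_equal_isSubstitutionCipher : Prop := ∀ (string1 : String) (string2 : String), Dom_isSubstitutionCipher string1 string2 → Spec_isSubstitutionCipher string1 string2 (isSubstitutionCipher string1 string2)

-- ===== LEMMAS AND PROOFS =====

-- the mathematical content both programs decide: the zipped pairs are functional in both directions
def Ok (ps : List (Char × Char)) : Prop :=
  ∀ p ∈ ps, ∀ q ∈ ps, (p.1 = q.1 ↔ p.2 = q.2)

lemma ok_of_subset {l l' : List (Char × Char)} (hsub : ∀ x ∈ l, x ∈ l') (h : Ok l') : Ok l :=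
  fun p hp q hq => h p (hsub p hp) q (hsub q hq)

-- ----- A-side: the dict loop decides Ok -----

lemma loopA_true_iff (ps : List (Char × Char)) :
    ∀ (seen : List (Char × Char)) (d1 d2 : PySem.Dict Char Char),
      (∀ a b : Char, d1.get? a = some b ↔ (a, b) ∈ seen) →
      (∀ a b : Char, d2.get? b = some a ↔ (a, b) ∈ seen) →
      Ok seen →
      (loopA ps d1 d2 = true ↔ Ok (seen ++ ps)) := by
  induction ps with
  | nil =>
    intro seen d1 d2 _ _ hok
    simpa [loopA] using hok
  | cons p rest ih =>
    obtain ⟨a, b⟩ := p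
    intro seen d1 d2 h1 h2 hok
    have hmem_ab : (a, b) ∈ seen ++ (a, b) :: rest := by simp
    simp only [loopA, stepA]
    cases hd1 : d1.get? a with
    | some b' =>
      have hb' : (a, b') ∈ seen := (h1 a b').mp hd1
      by_cases hne : b' = b
      · subst hne
        cases hd2 : d2.get? b' with
        | none =>
          have hcontra := (h2 a b').mpr hb'
          rw [hd2] at hcontra
          exact absurd hcontra (by simp)
        | some a' =>
          have ha' : (a', b') ∈ seen := (h2 a' b').mp hd2
          have haa : a' = a := (hok _ ha' _ hb').mpr rfl
          simp only [ne_eq, haa, not_true_eq_false, if_false]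
          have h1' : ∀ x y : Char, d1.get? x = some y ↔ (x, y) ∈ seen ++ [(a, b')] := by
            intro x y
            rw [h1]
            simp only [List.mem_append, List.mem_singleton]
            constructor
            · exact Or.inl
            · rintro (h | h)
              · exact h
              · rw [h]; exact hb'
          have h2' : ∀ x y : Char, d2.get? y = some x ↔ (x, y) ∈ seen ++ [(a, b')] := by
            intro x y
            rw [h2]
            simp only [List.mem_append, List.mem_singleton]
            constructor
            · exact Or.inl
            · rintro (h | h)
              · exact h
              · rw [h]; exact hb'
          have hok' : Ok (seen ++ [(a, b')]) := by
            refine ok_of_subset (fun x hx => ?_) hok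
            simp only [List.mem_append, List.mem_singleton] at hx
            rcases hx with h | h
            · exact h
            · rw [h]; exact hb'
          rw [ih (seen ++ [(a, b')]) d1 d2 h1' h2' hok']
          simp
      · simp only [ne_eq, hne, not_false_eq_true, if_true, Bool.false_eq_true, false_iff]
        intro hok2
        exact hne ((hok2 (a, b') (List.mem_append_left _ hb') (a, b) hmem_ab).mp rfl)
    | none =>
      have hfresh1 : ∀ y : Char, (a, y) ∉ seen := by
        intro y hy
        have hcontra := (h1 a y).mpr hy
        rw [hd1] at hcontra
        exact absurd hcontra (by simp)
      cases hd2 : d2.get? b with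
      | some a' =>
        have ha' : (a', b) ∈ seen := (h2 a' b).mp hd2
        have hne : a' ≠ a := fun h => hfresh1 b (h ▸ ha')
        simp only [ne_eq, hne, not_false_eq_true, if_true, Bool.false_eq_true, false_iff]
        intro hok2
        exact hne ((hok2 (a', b) (List.mem_append_left _ ha') (a, b) hmem_ab).mpr rfl)
      | none =>
        have hfresh2 : ∀ x : Char, (x, b) ∉ seen := by
          intro x hx
          have hcontra := (h2 x b).mpr hx
          rw [hd2] at hcontra
          exact absurd hcontra (by simp)
        have h1' : ∀ x y : Char, (d1.insert a b).get? x = some y ↔ (x, y) ∈ seen ++ [(a, b)] := by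
          intro x y
          rw [PySem.Dict.get?_insert]
          by_cases hx : x = a
          · subst hx
            rw [if_pos rfl]
            simp [hfresh1 y, eq_comm]
          · rw [if_neg hx, h1]
            simp [hx]
        have h2' : ∀ x y : Char, (d2.insert b a).get? y = some x ↔ (x, y) ∈ seen ++ [(a, b)] := by
          intro x y
          rw [PySem.Dict.get?_insert]
          by_cases hy : y = b
          · subst hy
            rw [if_pos rfl]
            simp [hfresh2 x, eq_comm]
          · rw [if_neg hy, h2]
            simp [hy]
        have hok' : Ok (seen ++ [(a, b)]) := by
          intro p hp q hq
          simp only [List.mem_append, List.mem_singleton] at hp hq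
          obtain ⟨p1, p2⟩ := p
          obtain ⟨q1, q2⟩ := q
          rcases hp with hp | hp <;> rcases hq with hq | hq
          · exact hok _ hp _ hq
          · rw [Prod.mk.injEq] at hq
            obtain ⟨rfl, rfl⟩ := hq
            constructor
            · intro h
              have h' : p1 = q1 := h
              exact absurd (h' ▸ hp) (hfresh1 p2)
            · intro h
              have h' : p2 = q2 := h
              exact absurd (h' ▸ hp) (hfresh2 p1)
          · rw [Prod.mk.injEq] at hp
            obtain ⟨rfl, rfl⟩ := hp
            constructor
            · intro h
              have h' : q1 = p1 := h.symm
              exact absurd (h' ▸ hq) (hfresh1 q2)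
            · intro h
              have h' : q2 = p2 := h.symm
              exact absurd (h' ▸ hq) (hfresh2 q1)
          · rw [Prod.mk.injEq] at hp hq
            obtain ⟨rfl, rfl⟩ := hp
            rw [hq.1, hq.2]
            simp
        rw [ih (seen ++ [(a, b)]) (d1.insert a b) (d2.insert b a) h1' h2' hok']
        simp

lemma isSub_true_iff (s1 s2 : String) :
    isSubstitutionCipher s1 s2 = true ↔ Ok (s1.toList.zip s2.toList) := by
  have h := loopA_true_iff (s1.toList.zip s2.toList) [] PySem.Dict.empty PySem.Dict.empty
    (by intro a b; simp [PySem.Dict.get?_empty])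
    (by intro a b; simp [PySem.Dict.get?_empty])
    (by intro p hp; simp at hp)
  simpa [isSubstitutionCipher] using h

-- ----- B-side: the cardinality test decides Ok -----

lemma set_len_eq_toFinset_card {α : Type} [BEq α] [LawfulBEq α] [DecidableEq α] (l : List α) :
    (PySem.Set.ofList l).length = l.toFinset.card := by
  rw [← List.toFinset_card_of_nodup (PySem.Set.nodup_ofList (xs := l))]
  congr 1
  ext x
  simp [PySem.Set.mem_ofList]

lemma toFinset_map_eq {α β : Type} [DecidableEq α] [DecidableEq β] (l : List α) (f : α → β) :
    (l.map f).toFinset = l.toFinset.image f := by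
  ext x
  simp

lemma ok_iff_injOn (ps : List (Char × Char)) :
    Ok ps ↔ Set.InjOn (fun p : Char × Char => p.1) (ps.toFinset : Set (Char × Char)) ∧
      Set.InjOn (fun p : Char × Char => p.2) (ps.toFinset : Set (Char × Char)) := by
  constructor
  · intro h
    constructor
    · intro p hp q hq he
      simp only [Finset.mem_coe, List.mem_toFinset] at hp hq
      exact Prod.ext he ((h p hp q hq).mp he)
    · intro p hp q hq he
      simp only [Finset.mem_coe, List.mem_toFinset] at hp hq
      exact Prod.ext ((h p hp q hq).mpr he) he
  · rintro ⟨hf, hs⟩ p hp q hq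
    constructor
    · intro he
      exact congrArg (fun p : Char × Char => p.2) (hf (by simp [hp]) (by simp [hq]) he)
    · intro he
      exact congrArg (fun p : Char × Char => p.1) (hs (by simp [hp]) (by simp [hq]) he)

lemma alt_true_iff (s1 s2 : String) :
    isSubstitutionCipher_alt s1 s2 = true ↔ Ok (s1.toList.zip s2.toList) := by
  simp only [isSubstitutionCipher_alt, Bool.and_eq_true, beq_iff_eq]
  rw [set_len_eq_toFinset_card, set_len_eq_toFinset_card, set_len_eq_toFinset_card,
    toFinset_map_eq, toFinset_map_eq, ok_iff_injOn]
  constructor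
  · rintro ⟨h1, h2⟩
    refine ⟨Finset.card_image_iff.mp h1.symm, Finset.card_image_iff.mp ?_⟩
    rw [← h2]
    exact h1.symm
  · rintro ⟨hf, hs⟩
    have h1 := Finset.card_image_iff.mpr hf
    have h2 := Finset.card_image_iff.mpr hs
    exact ⟨h1.symm, by rw [h1, h2]⟩

-- ===== VERDICT (by name: the statement is the Claim_ definition above) =====
theorem isSubstitutionCipher_spec : Claim_equal_isSubstitutionCipher := by
  intro s1 s2 _
  unfold Spec_isSubstitutionCipher
  rw [Bool.eq_iff_iff, isSub_true_iff, alt_true_iff]
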